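-- pv_equiv track=rewrite | github.com/KreOWO/OkishevLaboratoryWorks | PyLabs/2sem/lab1.py | find_best_chet_num
-- ===== SOURCE A (Python) =====
-- def find_best_chet_num(students):
--     lastres = -1
--     lasti = -1
--     for i, res in enumerate(students):
--         if res[-1] % 2 == 0 and res[-1] > lastres:
--             lastres = res[-1]
--             lasti = i
--     return lasti
-- ===== SOURCE B (Python) =====
-- def find_best_chet_num(students):
--     # Two-pass decomposition: collect candidate scores, take the max, locate first holder.
--     evens = [res[-1] for res in students if res[-1] % 2 == 0 and res[-1] > -1]
--     if not evens:
--         return -1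
--     m = max(evens)
--     for i, res in enumerate(students):
--         if res[-1] == m:
--             return i
-- ===== Notes on version B (the rewrite author's own statement) =====
-- stated objective: alternative
-- what changed: Replaces A's single scan tracking a running (best score, best index) pair with a two-pass decomposition: first collect the non-negative even last scores and take their max, then locate the first student whose last score equals that max.
import Mathlib
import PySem

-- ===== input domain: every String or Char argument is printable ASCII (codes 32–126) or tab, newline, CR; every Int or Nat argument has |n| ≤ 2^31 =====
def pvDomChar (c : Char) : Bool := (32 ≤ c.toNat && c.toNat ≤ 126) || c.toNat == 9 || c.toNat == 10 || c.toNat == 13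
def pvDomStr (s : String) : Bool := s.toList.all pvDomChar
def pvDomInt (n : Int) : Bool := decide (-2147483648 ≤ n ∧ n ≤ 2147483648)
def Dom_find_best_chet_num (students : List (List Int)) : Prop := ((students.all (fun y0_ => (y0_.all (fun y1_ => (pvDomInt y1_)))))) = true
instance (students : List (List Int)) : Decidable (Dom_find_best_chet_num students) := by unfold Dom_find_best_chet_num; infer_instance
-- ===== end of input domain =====

-- B changes the decomposition: two passes (max of the even non-negative last scores, then
-- first index holding it) instead of A's single scan carrying a running (best, index) pair.

-- ===== PORT A =====
-- res[-1]; on an empty row Python raises IndexError — those inputs are outside Pre_,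
-- so the .getD 0 default is never reached on admitted inputs.
def pvLast (res : List Int) : Int := (PySem.List.pyGet? res (-1)).getD 0

def find_best_chet_num (students : List (List Int)) : Int :=
  (students.foldl
    (fun (st : Int × Int × Int) res =>
      if PySem.Int.mod (pvLast res) 2 = 0 ∧ st.2.1 < pvLast res
      then (st.1 + 1, pvLast res, st.1)
      else (st.1 + 1, st.2.1, st.2.2))
    (0, -1, -1)).2.2

-- ===== PORT B =====
def find_best_chet_num_alt (students : List (List Int)) : Int :=
  let evens := (students.filter
      (fun res => decide (PySem.Int.mod (pvLast res) 2 = 0 ∧ -1 < pvLast res))).map pvLast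
  match PySem.List.max? evens (fun v => v) with
  | none => -1
  | some m =>
    match students.findIdx? (fun res => pvLast res == m) with
    | some i => (i : Int)
    | none => -1   -- unreachable: m is the last score of some student

-- ===== PRECONDITION & SPEC =====
-- Pre_ excludes exactly the inputs containing an empty row, on which Python's res[-1] raises IndexError.
def Pre_find_best_chet_num (students : List (List Int)) : Prop :=
  ∀ res ∈ students, res ≠ []
instance (students : List (List Int)) : Decidable (Pre_find_best_chet_num students) := by
  unfold Pre_find_best_chet_num; infer_instance

def pvWitness_find_best_chet_num : List (List Int) := [[1, 4], [2], [3, 6]]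

def Spec_find_best_chet_num (students : List (List Int)) (out : Int) : Prop := out = find_best_chet_num_alt students
instance (students : List (List Int)) (out : Int) : Decidable (Spec_find_best_chet_num students out) := by unfold Spec_find_best_chet_num; infer_instance

-- ===== CLAIM (what is proved, stated in full; the proofs are below) =====
def Claim_equal_find_best_chet_num : Prop := ∀ (students : List (List Int)), Dom_find_best_chet_num students → Pre_find_best_chet_num students → Spec_find_best_chet_num students (find_best_chet_num students)

-- ===== LEMMAS AND PROOFS =====

-- dropping elements ≤ the accumulator does not change a running max
theorem pv_foldl_max_drop (t : List Int) : ∀ (a v : Int), v ≤ a →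
    t.foldl max a = (t.filter (fun y => decide (v < y))).foldl max a := by
  induction t with
  | nil => intro a v _; rfl
  | cons y t ih =>
    intro a v hva
    by_cases hy : v < y
    · simp only [List.foldl_cons, List.filter_cons, hy, decide_true, if_true]
      exact ih (max a y) v (le_trans hva (le_max_left a y))
    · have : max a y = a := max_eq_left (by omega)
      simp only [List.foldl_cons, List.filter_cons, hy, decide_false, Bool.false_eq_true, if_false, this]
      exact ih a v hva

-- a running max started at v = v, or the max of the elements above v if there are any
theorem pv_fmax (l : List Int) : ∀ (v : Int),
    some (l.foldl max v) =
      (match PySem.List.max? (l.filter (fun x => decide (v < x))) (fun y => y) with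
       | none => some v
       | some m => some m) := by
  induction l with
  | nil => intro v; simp [PySem.List.max?]
  | cons x t ih =>
    intro v
    by_cases hx : v < x
    · simp only [List.foldl_cons, List.filter_cons, hx, decide_true, if_true,
        PySem.List.max?_id_cons, max_eq_right (le_of_lt hx)]
      rw [pv_foldl_max_drop t x v (le_of_lt hx)]
    · have : max v x = v := max_eq_left (by omega)
      simp only [List.foldl_cons, List.filter_cons, hx, decide_false, Bool.false_eq_true, if_false, this]
      exact ih v

-- the first index satisfying an attained predicate: findIdx? = some findIdx
theorem pv_findIdx?_eq (l : List (List Int)) (p : List Int → Bool) :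
    (∃ a ∈ l, p a = true) → l.findIdx? p = some (l.findIdx p) := by
  induction l with
  | nil => rintro ⟨a, ha, _⟩; cases ha
  | cons x t ih =>
    rintro ⟨a, ha, hpa⟩
    by_cases hx : p x = true
    · simp [List.findIdx?_cons, List.findIdx_cons, hx]
    · rcases List.mem_cons.mp ha with rfl | hat
      · exact absurd hpa hx
      · simp [List.findIdx?_cons, List.findIdx_cons, hx, ih ⟨a, hat, hpa⟩]

-- the loop of A, characterised by B's two passes, for every accumulator state
theorem pv_loop_char (t : List (List Int)) : ∀ (i lr li : Int),
    (t.foldl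
      (fun (st : Int × Int × Int) res =>
        if PySem.Int.mod (pvLast res) 2 = 0 ∧ st.2.1 < pvLast res
        then (st.1 + 1, pvLast res, st.1)
        else (st.1 + 1, st.2.1, st.2.2))
      (i, lr, li)).2.2 =
    (match PySem.List.max?
        ((t.filter (fun r => decide (PySem.Int.mod (pvLast r) 2 = 0 ∧ lr < pvLast r))).map pvLast)
        (fun v => v) with
     | none => li
     | some m => i + ((t.findIdx (fun r => pvLast r == m) : Nat) : Int)) := by
  induction t with
  | nil => intro i lr li; simp [PySem.List.max?]
  | cons r t ih =>
    intro i lr li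
    by_cases hb : PySem.Int.mod (pvLast r) 2 = 0 ∧ lr < pvLast r
    · -- branch taken: the head is a candidate
      simp only [List.foldl_cons, if_pos hb]
      rw [ih (i + 1) (pvLast r) i]
      have hhead : (decide (PySem.Int.mod (pvLast r) 2 = 0 ∧ lr < pvLast r)) = true := by
        simpa using hb
      simp only [List.filter_cons, hhead, if_true, List.map_cons, PySem.List.max?_id_cons]
      -- align the recursive call's filter with a filter of the outer candidate list
      have hfilt : (t.filter (fun x => decide (PySem.Int.mod (pvLast x) 2 = 0 ∧ pvLast r < pvLast x)))
          = (t.filter (fun x => decide (PySem.Int.mod (pvLast x) 2 = 0 ∧ lr < pvLast x))).filter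
              (fun x => decide (pvLast r < pvLast x)) := by
        rw [List.filter_filter]
        apply List.filter_congr
        intro a _
        by_cases h1 : PySem.Int.mod (pvLast a) 2 = 0 <;>
          by_cases h2 : pvLast r < pvLast a <;>
            simp [h2] <;> omega
      have hmapfilt :
          ((t.filter (fun x => decide (PySem.Int.mod (pvLast x) 2 = 0 ∧ lr < pvLast x))).map pvLast).filter
              (fun x => decide (pvLast r < x))
          = (t.filter (fun x => decide (PySem.Int.mod (pvLast x) 2 = 0 ∧ pvLast r < pvLast x))).map pvLast := by
        rw [List.filter_map, hfilt]; rfl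
      have hmax := pv_fmax
        ((t.filter (fun x => decide (PySem.Int.mod (pvLast x) 2 = 0 ∧ lr < pvLast x))).map pvLast)
        (pvLast r)
      rw [hmapfilt] at hmax
      cases hM : PySem.List.max?
          ((t.filter (fun x => decide (PySem.Int.mod (pvLast x) 2 = 0 ∧ pvLast r < pvLast x))).map pvLast)
          (fun v => v) with
      | none =>
        rw [hM] at hmax
        simp only [Option.some.injEq] at hmax
        rw [hmax]
        simp [List.findIdx_cons]
      | some m =>
        rw [hM] at hmax
        simp only [Option.some.injEq] at hmax
        rw [hmax]
        -- m is strictly above the head value, so the head does not hold it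
        have hmem := PySem.List.max?_mem hM
        have hlt : pvLast r < m := by
          rcases List.mem_map.mp hmem with ⟨a, hat, rfl⟩
          have := (List.mem_filter.mp hat).2
          simp only [decide_eq_true_eq] at this
          exact this.2
        have hne : (pvLast r == m) = false := by simp; omega
        simp [List.findIdx_cons, hne]
        ring
    · -- branch not taken: the head is skipped by both sides
      simp only [List.foldl_cons, if_neg hb]
      rw [ih (i + 1) lr li]
      have hhead : (decide (PySem.Int.mod (pvLast r) 2 = 0 ∧ lr < pvLast r)) = false := by
        simpa using hb
      simp only [List.filter_cons, hhead, Bool.false_eq_true, if_false]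
      cases hM : PySem.List.max?
          ((t.filter (fun x => decide (PySem.Int.mod (pvLast x) 2 = 0 ∧ lr < pvLast x))).map pvLast)
          (fun v => v) with
      | none => rfl
      | some m =>
        have hmem := PySem.List.max?_mem hM
        have hm : PySem.Int.mod m 2 = 0 ∧ lr < m := by
          rcases List.mem_map.mp hmem with ⟨a, hat, rfl⟩
          have := (List.mem_filter.mp hat).2
          simpa using this
        have hne : (pvLast r == m) = false := by
          simp only [beq_eq_false_iff_ne, ne_eq]
          intro h
          exact hb (h ▸ hm)
        simp [List.findIdx_cons, hne]
        ring

theorem find_best_chet_num_spec : Claim_equal_find_best_chet_num := by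
  intro students _ _
  unfold Spec_find_best_chet_num find_best_chet_num find_best_chet_num_alt
  rw [pv_loop_char students 0 (-1) (-1)]
  cases hM : PySem.List.max?
      ((students.filter (fun r => decide (PySem.Int.mod (pvLast r) 2 = 0 ∧ -1 < pvLast r))).map pvLast)
      (fun v => v) with
  | none => simp only [hM]
  | some m =>
    simp only [hM]
    have hmem := PySem.List.max?_mem hM
    have hex : ∃ a ∈ students, (pvLast a == m) = true := by
      rcases List.mem_map.mp hmem with ⟨a, hat, rfl⟩
      exact ⟨a, (List.mem_filter.mp hat).1, by simp⟩
    rw [pv_findIdx?_eq students _ hex]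
    simp
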